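-- pv_equiv track=rewrite | github.com/bakseoyong/codingtest-python | 프로그래머스/쿠키구입.py | solution
-- ===== SOURCE A (Python) =====
-- def solution(cookie):
--     answer = 0
--
--     for standard_line in range(len(cookie) - 1):
--         two_pointer_left = standard_line
--         two_pointer_right = standard_line + 1
--
--         left_sum = cookie[two_pointer_left]
--         right_sum = cookie[two_pointer_right]
--         while True:
--             if left_sum == right_sum:
--                 answer = max(answer, left_sum)
--
--             if left_sum >= right_sum:
--                 if two_pointer_right == len(cookie) - 1:
--                     break
--                 else:
--                     two_pointer_right += 1
--                     right_sum += cookie[two_pointer_right]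
--             elif left_sum <= right_sum:
--                 if two_pointer_left == 0:
--                     break
--                 else:
--                     two_pointer_left -= 1
--                     left_sum += cookie[two_pointer_left]
--
--     return answer
-- ===== SOURCE B (Python) =====
-- def catch_up(prefix, limit, l):
--     # walk the left endpoint down until its prefix value fits under `limit` (or it hits 0)
--     while l > 0 and prefix[l] > limit:
--         l -= 1
--     return l
--
--
-- def best_for_split(prefix, n, m):
--     # best balanced value for the split after index m; 0 if none
--     pivot = prefix[m + 1]
--     best = 0
--     l = m
--     for r in range(m + 1, n):
--         right = prefix[r + 1] - pivot
--         l = catch_up(prefix, pivot - right, l)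
--         left = pivot - prefix[l]
--         if left == right and left > best:
--             best = left
--         if left < right:  # l hit 0 and the left side still falls short
--             break
--     return best
--
--
-- def solution(cookie):
--     prefix = [0]
--     for x in cookie:
--         prefix.append(prefix[-1] + x)
--     n = len(cookie)
--     return max((best_for_split(prefix, n, m) for m in range(n - 1)), default=0)
-- ===== Notes on version B (the rewrite author's own statement) =====
-- stated objective: alternative
-- what changed: B precomputes one global prefix-sum table and decomposes the work into per-split helper calls combined by max(..., default=0): for each split it sweeps right endpoints in a plain for loop, calls a catch_up routine that only moves the left index (tracking no sums) and tests balance once per right endpoint, replacing A's single while-True merge loop that threads four mutable running-sum/pointer variables and tests equality at every step.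
import Mathlib
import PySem

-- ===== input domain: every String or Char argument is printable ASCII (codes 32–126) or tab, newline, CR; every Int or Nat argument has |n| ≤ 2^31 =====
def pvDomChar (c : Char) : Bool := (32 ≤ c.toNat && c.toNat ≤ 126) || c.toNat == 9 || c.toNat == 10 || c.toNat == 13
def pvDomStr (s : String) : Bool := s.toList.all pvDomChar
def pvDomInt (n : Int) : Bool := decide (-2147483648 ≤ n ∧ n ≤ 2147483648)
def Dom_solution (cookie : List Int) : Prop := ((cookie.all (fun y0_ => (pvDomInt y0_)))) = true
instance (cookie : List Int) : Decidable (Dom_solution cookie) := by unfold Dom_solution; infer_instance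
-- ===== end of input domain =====

-- B restructures A's single interleaved two-pointer while-loop into a prefix-sum table,
-- a per-split helper swept by right endpoint with a sum-free catch-up of the left index,
-- and max(..., default=0) over the splits (objective: alternative, same cost).

-- ===== PORT A =====
-- inner `while True` of A; fuel only guards totality (the walk makes at most
-- cookie.length - 1 steps, so fuel = cookie.length is never exhausted at runtime)
def loopA (cookie : List Int) (fuel : Nat) (l r : Nat) (L R ans : Int) : Int :=
  match fuel with
  | 0 => ans
  | fuel + 1 =>
    let ans' := if L = R then max ans L else ans
    if L ≥ R then
      if r = cookie.length - 1 then ans'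
      else loopA cookie fuel l (r + 1) L (R + cookie.getD (r + 1) 0) ans'
    else
      if L ≤ R then
        if l = 0 then ans'
        else loopA cookie fuel (l - 1) r (L + cookie.getD (l - 1) 0) R ans'
      else ans'  -- unreachable: ¬(L ≥ R) implies L ≤ R

def solution (cookie : List Int) : Int :=
  (List.range (cookie.length - 1)).foldl
    (fun ans m =>
      loopA cookie cookie.length m (m + 1) (cookie.getD m 0) (cookie.getD (m + 1) 0) ans)
    0

-- ===== PORT B =====
-- prefix = [0]; for x in cookie: prefix.append(prefix[-1] + x)
def prefixB (cookie : List Int) : List Int :=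
  cookie.foldl (fun acc x => acc ++ [acc.getLastD 0 + x]) [0]

-- catch_up: while l > 0 and prefix[l] > limit: l -= 1  (structural recursion on l)
def catchUp (pfx : List Int) (limit : Int) : Nat → Nat
  | 0 => 0
  | l + 1 => if pfx.getD (l + 1) 0 > limit then catchUp pfx limit l else l + 1

-- the `for r in range(m+1, n)` body of best_for_split, with `break`; cnt = n - r columns left
def colLoop (pfx : List Int) (pivot : Int) (cnt r l : Nat) (best : Int) : Int :=
  match cnt with
  | 0 => best
  | cnt + 1 =>
    let right := pfx.getD (r + 1) 0 - pivot
    let l' := catchUp pfx (pivot - right) l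
    let left := pivot - pfx.getD l' 0
    let best' := if left = right ∧ left > best then left else best
    if left < right then best'
    else colLoop pfx pivot cnt (r + 1) l' best'

def bestForSplit (pfx : List Int) (n m : Nat) : Int :=
  colLoop pfx (pfx.getD (m + 1) 0) (n - (m + 1)) (m + 1) m 0

def solution_alt (cookie : List Int) : Int :=
  let pfx := prefixB cookie
  let n := cookie.length
  (PySem.List.max? ((List.range (n - 1)).map (fun m => bestForSplit pfx n m))
      (fun v => v)).getD 0

-- ===== PRECONDITION & SPEC =====
def Spec_solution (cookie : List Int) (out : Int) : Prop := out = solution_alt cookie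
instance (cookie : List Int) (out : Int) : Decidable (Spec_solution cookie out) := by unfold Spec_solution; infer_instance

-- ===== CLAIM (what is proved, stated in full; the proofs are below) =====
def Claim_equal_solution : Prop := ∀ (cookie : List Int), Dom_solution cookie → Spec_solution cookie (solution cookie)

-- ===== LEMMAS AND PROOFS =====

-- running partial sums starting from s (proof-only helper)
def partials (s : Int) : List Int → List Int
  | [] => []
  | y :: ys => (s + y) :: partials (s + y) ys

theorem foldl_append_step (xs : List Int) :
    ∀ (acc : List Int), acc ≠ [] →
      xs.foldl (fun a x => a ++ [a.getLastD 0 + x]) acc = acc ++ partials (acc.getLastD 0) xs := by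
  induction xs with
  | nil => intro acc _; simp [partials]
  | cons y ys ih =>
    intro acc hacc
    have h1 : (acc ++ [acc.getLastD 0 + y]).getLastD 0 = acc.getLastD 0 + y := by simp
    simp only [List.foldl_cons]
    rw [ih _ (by simp), h1, partials, List.append_assoc]
    simp

theorem prefixB_eq (cookie : List Int) : prefixB cookie = 0 :: partials 0 cookie := by
  unfold prefixB
  rw [foldl_append_step cookie [0] (by simp)]
  simp [List.getLastD]

theorem partials_getD_succ (ys : List Int) :
    ∀ (s : Int) (k : Nat), k + 1 < ys.length →
      (partials s ys).getD (k + 1) 0 = (partials s ys).getD k 0 + ys.getD (k + 1) 0 := by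
  induction ys with
  | nil => intro s k h; simp at h
  | cons y ys ih =>
    intro s k h
    cases k with
    | zero =>
      cases ys with
      | nil => simp at h
      | cons z zs => simp [partials]
    | succ k' =>
      have h' : k' + 1 < ys.length := by simpa using h
      simp only [partials, List.getD_cons_succ]
      exact ih (s + y) k' h'

-- P (i+1) = P i + cookie[i] for i < n
theorem prefix_step (cookie : List Int) (i : Nat) (hi : i < cookie.length) :
    (prefixB cookie).getD (i + 1) 0 = (prefixB cookie).getD i 0 + cookie.getD i 0 := by
  rw [prefixB_eq]
  cases i with
  | zero =>
    cases cookie with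
    | nil => simp at hi
    | cons y ys => simp [partials]
  | succ k =>
    simp only [List.getD_cons_succ]
    exact partials_getD_succ cookie 0 k hi

-- catchUp does nothing when the left prefix already fits under `limit`
theorem catchUp_id (pfx : List Int) (limit : Int) (l : Nat)
    (h : ¬ pfx.getD l 0 > limit) : catchUp pfx limit l = l := by
  cases l with
  | zero => rfl
  | succ k =>
    show (if pfx.getD (k + 1) 0 > limit then catchUp pfx limit k else k + 1) = k + 1
    rw [if_neg h]

-- catchUp absorbs one pending decrement
theorem catchUp_step (pfx : List Int) (limit : Int) (l : Nat) (hl : 0 < l)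
    (h : pfx.getD l 0 > limit) :
    catchUp pfx limit l = catchUp pfx limit (l - 1) := by
  cases l with
  | zero => omega
  | succ k =>
    show (if pfx.getD (k + 1) 0 > limit then catchUp pfx limit k else k + 1) =
      catchUp pfx limit k
    rw [if_pos h]

-- the result of colLoop dominates its accumulator
theorem colLoop_ge (pfx : List Int) (pivot : Int) :
    ∀ (cnt r l : Nat) (b : Int), b ≤ colLoop pfx pivot cnt r l b := by
  intro cnt
  induction cnt with
  | zero => intro r l b; simp [colLoop]
  | succ cnt ih =>
    intro r l b
    simp only [colLoop]
    set l' := catchUp pfx (pivot - (pfx.getD (r + 1) 0 - pivot)) l with hl'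
    by_cases he : pivot - pfx.getD l' 0 = pfx.getD (r + 1) 0 - pivot ∧
        pivot - pfx.getD l' 0 > b
    · rw [if_pos he]
      split_ifs
      · omega
      · have := ih (r + 1) l' (pivot - pfx.getD l' 0); omega
    · rw [if_neg he]
      split_ifs
      · omega
      · exact ih (r + 1) l' b

-- the accumulator can be pulled out of colLoop as a max
theorem colLoop_max (pfx : List Int) (pivot : Int) :
    ∀ (cnt r l : Nat) (b : Int), 0 ≤ b →
      colLoop pfx pivot cnt r l b = max b (colLoop pfx pivot cnt r l 0) := by
  intro cnt
  induction cnt with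
  | zero => intro r l b hb; simp only [colLoop]; omega
  | succ cnt ih =>
    intro r l b hb
    simp only [colLoop]
    set l' := catchUp pfx (pivot - (pfx.getD (r + 1) 0 - pivot)) l with hl'
    set left := pivot - pfx.getD l' 0 with hleft
    set right := pfx.getD (r + 1) 0 - pivot with hright
    set u := (if left = right ∧ left > 0 then left else 0) with hu
    have hu0 : 0 ≤ u := by rw [hu]; split_ifs <;> omega
    have hbv : (if left = right ∧ left > b then left else b) = max b u := by
      rw [hu]
      by_cases he : left = right
      · by_cases h1 : left > b
        · rw [if_pos ⟨he, h1⟩]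
          by_cases h0 : left > 0
          · rw [if_pos ⟨he, h0⟩]; omega
          · rw [if_neg (by omega : ¬ (left = right ∧ left > 0))]; omega
        · rw [if_neg (by omega : ¬ (left = right ∧ left > b))]
          by_cases h0 : left > 0
          · rw [if_pos ⟨he, h0⟩]; omega
          · rw [if_neg (by omega : ¬ (left = right ∧ left > 0))]; omega
      · rw [if_neg (by tauto), if_neg (by tauto)]; omega
    rw [hbv]
    by_cases hbr : left < right
    · rw [if_pos hbr, if_pos hbr]
    · rw [if_neg hbr, if_neg hbr,
        ih (r + 1) l' (max b u) (by omega), ih (r + 1) l' u hu0]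
      omega

-- core bisimulation: A's inner walk equals B's column sweep from the same state
theorem loop_eq (cookie : List Int) (m : Nat) :
    ∀ (fuel l r : Nat) (L R ans : Int),
      l ≤ m → m + 1 ≤ r → r ≤ cookie.length - 1 → m + 1 < cookie.length →
      L = (prefixB cookie).getD (m + 1) 0 - (prefixB cookie).getD l 0 →
      R = (prefixB cookie).getD (r + 1) 0 - (prefixB cookie).getD (m + 1) 0 →
      fuel ≥ l + (cookie.length - 1 - r) + 1 →
      loopA cookie fuel l r L R ans =
        colLoop (prefixB cookie) ((prefixB cookie).getD (m + 1) 0)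
          (cookie.length - r) r l ans := by
  intro fuel
  induction fuel with
  | zero => intro l r L R ans _ _ _ _ _ _ hf; omega
  | succ fuel ih =>
    intro l r L R ans hlm hmr hrn hmn hL hR hf
    rw [loopA]
    have hcnt : cookie.length - r = (cookie.length - (r + 1)) + 1 := by omega
    by_cases hge : L ≥ R
    · -- catchUp is the identity here, so B's column state is exactly A's
      have hcu : catchUp (prefixB cookie)
          ((prefixB cookie).getD (m + 1) 0 -
            ((prefixB cookie).getD (r + 1) 0 - (prefixB cookie).getD (m + 1) 0)) l = l :=
        catchUp_id _ _ _ (by omega)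
      rw [hcnt]
      simp only [colLoop]
      rw [hcu]
      have hleft : (prefixB cookie).getD (m + 1) 0 - (prefixB cookie).getD l 0 = L := by omega
      have hright : (prefixB cookie).getD (r + 1) 0 - (prefixB cookie).getD (m + 1) 0 = R := by
        omega
      rw [hleft, hright, if_pos hge]
      have hbest : (if L = R ∧ L > ans then L else ans) = (if L = R then max ans L else ans) := by
        by_cases he : L = R
        · by_cases hgt : L > ans
          · rw [if_pos ⟨he, hgt⟩, if_pos he]; omega
          · rw [if_neg (by omega : ¬ (L = R ∧ L > ans)), if_pos he]; omega
        · rw [if_neg (by tauto), if_neg he]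
      rw [if_neg (by omega : ¬ L < R), hbest]
      by_cases hbr : r = cookie.length - 1
      · rw [if_pos hbr]
        have h0 : cookie.length - (r + 1) = 0 := by omega
        rw [h0, colLoop]
      · rw [if_neg hbr]
        rw [ih l (r + 1) L (R + cookie.getD (r + 1) 0) _ hlm (by omega) (by omega) hmn hL
          (by have := prefix_step cookie (r + 1) (by omega); omega) (by omega)]
    · -- L < R: A decrements the left pointer; B's catchUp absorbs the same step
      have hlt : L < R := by omega
      rw [if_neg hge, if_pos (by omega : L ≤ R), if_neg (by omega : ¬ L = R)]
      by_cases hl0 : l = 0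
      · -- break: B's catchUp stays at 0, left < right, the column returns the accumulator
        subst hl0
        rw [if_pos rfl, hcnt]
        simp only [colLoop]
        have hcu : catchUp (prefixB cookie)
            ((prefixB cookie).getD (m + 1) 0 -
              ((prefixB cookie).getD (r + 1) 0 - (prefixB cookie).getD (m + 1) 0)) 0 = 0 := rfl
        rw [hcu]
        have hleft : (prefixB cookie).getD (m + 1) 0 - (prefixB cookie).getD 0 0 = L := by omega
        have hright : (prefixB cookie).getD (r + 1) 0 - (prefixB cookie).getD (m + 1) 0 = R := by
          omega
        rw [hleft, hright, if_neg (by omega : ¬ (L = R ∧ L > ans)), if_pos hlt]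
      · rw [if_neg hl0]
        have hstep : (prefixB cookie).getD (l - 1) 0 + cookie.getD (l - 1) 0 =
            (prefixB cookie).getD l 0 := by
          have h2 := prefix_step cookie (l - 1) (by omega)
          have h1 : l - 1 + 1 = l := by omega
          rw [h1] at h2; omega
        rw [ih (l - 1) r (L + cookie.getD (l - 1) 0) R ans (by omega) hmr hrn hmn
          (by omega) hR (by omega)]
        -- fold B's first catch-up step back in
        rw [hcnt]
        simp only [colLoop]
        rw [catchUp_step (prefixB cookie)
          ((prefixB cookie).getD (m + 1) 0 -
            ((prefixB cookie).getD (r + 1) 0 - (prefixB cookie).getD (m + 1) 0)) l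
          (by omega) (by omega)]

-- Python's max(xs, default=0) is the running-max fold when every element is ≥ 0
theorem maxD_eq_foldl (xs : List Int) (h : ∀ x ∈ xs, 0 ≤ x) :
    (PySem.List.max? xs (fun v => v)).getD 0 = xs.foldl max 0 := by
  cases xs with
  | nil => rfl
  | cons y ys =>
    rw [PySem.List.max?_id_cons]
    simp only [Option.getD_some, List.foldl_cons]
    have hy : 0 ≤ y := h y (by simp)
    have : max 0 y = y := by omega
    rw [this]

-- the outer fold of A equals a max-fold of the per-split results of B
theorem outer_fold (cookie : List Int) :
    ∀ (ms : List Nat) (a : Int), 0 ≤ a →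
      (∀ m ∈ ms, m + 1 < cookie.length) →
      ms.foldl
        (fun ans m =>
          loopA cookie cookie.length m (m + 1) (cookie.getD m 0) (cookie.getD (m + 1) 0) ans)
        a =
      (ms.map (fun m => bestForSplit (prefixB cookie) cookie.length m)).foldl max a := by
  intro ms
  induction ms with
  | nil => intro a _ _; rfl
  | cons m ms ih =>
    intro a ha hmem
    have hmn : m + 1 < cookie.length := hmem m (by simp)
    simp only [List.foldl_cons, List.map_cons]
    have hA : loopA cookie cookie.length m (m + 1) (cookie.getD m 0) (cookie.getD (m + 1) 0) a =
        colLoop (prefixB cookie) ((prefixB cookie).getD (m + 1) 0)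
          (cookie.length - (m + 1)) (m + 1) m a := by
      apply loop_eq cookie m cookie.length m (m + 1) _ _ a (le_refl m) (le_refl (m + 1))
        (by omega) hmn
      · have := prefix_step cookie m (by omega); omega
      · have := prefix_step cookie (m + 1) hmn; omega
      · omega
    rw [hA, colLoop_max _ _ _ _ _ _ ha]
    have hb : bestForSplit (prefixB cookie) cookie.length m =
        colLoop (prefixB cookie) ((prefixB cookie).getD (m + 1) 0)
          (cookie.length - (m + 1)) (m + 1) m 0 := rfl
    rw [← hb, ih (max a (bestForSplit (prefixB cookie) cookie.length m))
      (by have := colLoop_ge (prefixB cookie) ((prefixB cookie).getD (m + 1) 0)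
            (cookie.length - (m + 1)) (m + 1) m 0
          rw [← hb] at this; omega)
      (fun x hx => hmem x (by simp [hx]))]

-- ===== VERDICT (by name: the statement is the Claim_ definition above) =====
theorem solution_spec : Claim_equal_solution := by
  intro cookie _
  unfold Spec_solution
  show solution cookie = solution_alt cookie
  unfold solution solution_alt
  rw [outer_fold cookie (List.range (cookie.length - 1)) 0 (le_refl 0)
    (fun m hm => by have := List.mem_range.mp hm; omega)]
  rw [maxD_eq_foldl]
  intro x hx
  simp only [List.mem_map] at hx
  obtain ⟨m, _, rfl⟩ := hx
  exact colLoop_ge _ _ _ _ _ 0
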